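-- pv_equiv track=rewrite | github.com/tanushmehta05/CrisisCompass | CrisisCompassAPI/api/models/classifier.py | dynamic_logic_warning
-- ===== SOURCE A (Python) =====
-- recent_disasters = [
--     {"type": "Flood", "state": "Assam"},
--     {"type": "Flood", "state": "Meghalaya"},
--     {"type": "Flood", "state": "Mizoram"},
--     {"type": "Landslide", "state": "Uttarakhand"},
--     {"type": "Cloudburst", "state": "Uttarakhand"},
--     {"type": "Flash Flood", "state": "Himachal Pradesh"},
--     {"type": "Flood", "state": "Arunachal Pradesh"},
--     {"type": "Flash Flood", "state": "Jammu & Kashmir"},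
--     {"type": "Avalanche", "state": "Uttarakhand"},
-- ]
--
-- def dynamic_logic_warning(crisis_type, state):
--     if crisis_type.lower() == "search & rescue":
--         return None
--
--     type_map = {
--         "Flood": ["flood", "flash flood"],
--         "Landslide": ["landslide", "cloudburst"],
--         "Avalanche": ["avalanche"],
--         "Search & Rescue": ["rescue", "landslide", "collapse", "flood", "disaster"],
--     }
--     c = crisis_type.lower()
--     s = state.lower()
--
--     for rec in recent_disasters:
--         if s == rec["state"].lower():
--             for match in type_map.get(crisis_type, [c]):
--                 if match.lower() in rec["type"].lower():
--                     return None
--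
--     if crisis_type in type_map:
--         return f"⚠️ {crisis_type} is uncommon in {state}. Please verify."
--     return None
-- ===== SOURCE B (Python) =====
-- # Precompute, per known crisis type, the list of states where it is common;
-- # an unknown crisis type can never produce the warning, so no scan is needed at call time.
-- recent_disasters = [
--     {"type": "Flood", "state": "Assam"},
--     {"type": "Flood", "state": "Meghalaya"},
--     {"type": "Flood", "state": "Mizoram"},
--     {"type": "Landslide", "state": "Uttarakhand"},
--     {"type": "Cloudburst", "state": "Uttarakhand"},
--     {"type": "Flash Flood", "state": "Himachal Pradesh"},
--     {"type": "Flood", "state": "Arunachal Pradesh"},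
--     {"type": "Flash Flood", "state": "Jammu & Kashmir"},
--     {"type": "Avalanche", "state": "Uttarakhand"},
-- ]
--
-- _type_map = {
--     "Flood": ["flood", "flash flood"],
--     "Landslide": ["landslide", "cloudburst"],
--     "Avalanche": ["avalanche"],
--     "Search & Rescue": ["rescue", "landslide", "collapse", "flood", "disaster"],
-- }
--
-- _types_by_state = {}
-- for _rec in recent_disasters:
--     _types_by_state.setdefault(_rec["state"].lower(), []).append(_rec["type"].lower())
--
-- _common_states = {
--     k: [st for st, ts in _types_by_state.items()
--         if any(kw.lower() in t for kw in kws for t in ts)]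
--     for k, kws in _type_map.items()
-- }
--
-- def dynamic_logic_warning(crisis_type, state):
--     if crisis_type.lower() == "search & rescue":
--         return None
--     if crisis_type not in _type_map:
--         # an unknown crisis type never reaches the warning branch
--         return None
--     if state.lower() in _common_states[crisis_type]:
--         return None
--     return f"⚠️ {crisis_type} is uncommon in {state}. Please verify."
-- ===== Notes on version B (the rewrite author's own statement) =====
-- stated objective: idiomatic
-- what changed: B precomputes once, per known crisis type, the list of states where it is common (a dict built from recent_disasters and the keyword map), so the call does a table lookup plus membership test instead of A's per-call nested scan over records and keywords; B also drops the scan entirely for unknown crisis types, which can never trigger the warning.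
import Mathlib
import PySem

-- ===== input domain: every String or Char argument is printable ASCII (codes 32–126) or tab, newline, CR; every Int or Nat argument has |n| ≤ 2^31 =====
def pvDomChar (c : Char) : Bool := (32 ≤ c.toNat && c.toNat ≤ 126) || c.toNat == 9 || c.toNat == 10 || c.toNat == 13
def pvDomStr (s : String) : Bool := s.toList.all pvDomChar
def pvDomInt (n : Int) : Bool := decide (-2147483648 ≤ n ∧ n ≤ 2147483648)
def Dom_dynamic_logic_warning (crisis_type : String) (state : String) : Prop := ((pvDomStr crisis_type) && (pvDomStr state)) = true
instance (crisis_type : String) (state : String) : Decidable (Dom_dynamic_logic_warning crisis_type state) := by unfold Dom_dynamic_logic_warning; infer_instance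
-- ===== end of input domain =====

-- B precomputes a known-type → common-states table once; proven equal to A's per-call scan (idiomatic/data-structure change).

-- ===== PORT A =====
-- recent_disasters as (type, state) pairs
def pvRecents : List (String × String) :=
  [("Flood", "Assam"), ("Flood", "Meghalaya"), ("Flood", "Mizoram"),
   ("Landslide", "Uttarakhand"), ("Cloudburst", "Uttarakhand"),
   ("Flash Flood", "Himachal Pradesh"), ("Flood", "Arunachal Pradesh"),
   ("Flash Flood", "Jammu & Kashmir"), ("Avalanche", "Uttarakhand")]

def pvTypeMapA : PySem.Dict String (List String) :=
  PySem.Dict.ofList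
    [("Flood", ["flood", "flash flood"]),
     ("Landslide", ["landslide", "cloudburst"]),
     ("Avalanche", ["avalanche"]),
     ("Search & Rescue", ["rescue", "landslide", "collapse", "flood", "disaster"])]

def dynamic_logic_warning (crisis_type : String) (state : String) : Option String :=
  if PySem.Str.lower crisis_type == "search & rescue" then none
  else
    let c := PySem.Str.lower crisis_type
    let s := PySem.Str.lower state
    -- the for-loop: the only early return is None, so it is a Bool scan
    if pvRecents.any (fun rec =>
        s == PySem.Str.lower rec.2 &&
        (PySem.Dict.getD pvTypeMapA crisis_type [c]).any
          (fun m => PySem.Str.isIn (PySem.Str.lower m) (PySem.Str.lower rec.1))) then none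
    else if PySem.Dict.contains pvTypeMapA crisis_type then
      some ("⚠️ " ++ crisis_type ++ " is uncommon in " ++ state ++ ". Please verify.")
    else none

-- ===== PORT B =====
def pvTypeMapB : PySem.Dict String (List String) :=
  PySem.Dict.ofList
    [("Flood", ["flood", "flash flood"]),
     ("Landslide", ["landslide", "cloudburst"]),
     ("Avalanche", ["avalanche"]),
     ("Search & Rescue", ["rescue", "landslide", "collapse", "flood", "disaster"])]

-- _types_by_state: setdefault(k, []).append(t)  =  modify with default []
def pvTypesByState : PySem.Dict String (List String) :=
  pvRecents.foldl
    (fun d rec => d.modify (PySem.Str.lower rec.2) []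
      (fun ts => ts ++ [PySem.Str.lower rec.1]))
    PySem.Dict.empty

-- _common_states: for each known type, the states whose recent types contain a keyword
def pvCommonStates : PySem.Dict String (List String) :=
  PySem.Dict.ofList
    (pvTypeMapB.items.map (fun kv =>
      (kv.1,
       (pvTypesByState.items.filter (fun stts =>
          kv.2.any (fun kw => stts.2.any (fun t => PySem.Str.isIn (PySem.Str.lower kw) t)))).map
         (fun stts => stts.1))))

def dynamic_logic_warning_alt (crisis_type : String) (state : String) : Option String :=
  if PySem.Str.lower crisis_type == "search & rescue" then none
  else if !(PySem.Dict.contains pvTypeMapB crisis_type) then none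
  else if (PySem.Dict.getD pvCommonStates crisis_type []).contains (PySem.Str.lower state) then none
  else some ("⚠️ " ++ crisis_type ++ " is uncommon in " ++ state ++ ". Please verify.")

-- ===== PRECONDITION & SPEC =====
def Spec_dynamic_logic_warning (crisis_type : String) (state : String) (out : Option String) : Prop := out = dynamic_logic_warning_alt crisis_type state
instance (crisis_type : String) (state : String) (out : Option String) : Decidable (Spec_dynamic_logic_warning crisis_type state out) := by unfold Spec_dynamic_logic_warning; infer_instance

-- ===== CLAIM (what is proved, stated in full; the proofs are below) =====
def Claim_equal_dynamic_logic_warning : Prop := ∀ (crisis_type : String) (state : String), Dom_dynamic_logic_warning crisis_type state → Spec_dynamic_logic_warning crisis_type state (dynamic_logic_warning crisis_type state)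

-- ===== LEMMAS AND PROOFS =====

-- A's scan over the records, for a fixed record predicate K, is membership of the
-- lowercased states of the K-records.
theorem any_eq_contains (xs : List (String × String)) (K : String × String → Bool) (s : String) :
    (xs.any fun rec => s == PySem.Str.lower rec.2 && K rec)
      = ((xs.filter K).map (fun rec => PySem.Str.lower rec.2)).contains s := by
  induction xs with
  | nil => rfl
  | cons h t ih =>
    by_cases hk : K h = true <;> simp [List.any_cons, hk, ih]

theorem key_case (ct : String) (st : String)
    (hlow : (PySem.Str.lower ct == "search & rescue") = false)
    (hA : ∀ s : String,
      (pvRecents.any (fun rec =>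
        s == PySem.Str.lower rec.2 &&
        (PySem.Dict.getD pvTypeMapA ct [PySem.Str.lower ct]).any
          (fun m => PySem.Str.isIn (PySem.Str.lower m) (PySem.Str.lower rec.1))))
      = (PySem.Dict.getD pvCommonStates ct []).contains s)
    (hC : PySem.Dict.contains pvTypeMapA ct = true)
    (hC' : PySem.Dict.contains pvTypeMapB ct = true) :
    dynamic_logic_warning ct st = dynamic_logic_warning_alt ct st := by
  simp only [dynamic_logic_warning, dynamic_logic_warning_alt, hlow, hA, hC, hC',
    Bool.false_eq_true, if_false, Bool.not_true]
  split <;> rfl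

theorem unknown_case (ct : String) (st : String)
    (hlow : (PySem.Str.lower ct == "search & rescue") = false)
    (hC : PySem.Dict.contains pvTypeMapA ct = false)
    (hC' : PySem.Dict.contains pvTypeMapB ct = false) :
    dynamic_logic_warning ct st = dynamic_logic_warning_alt ct st := by
  simp only [dynamic_logic_warning, dynamic_logic_warning_alt, hlow, hC, hC',
    Bool.false_eq_true, if_false, Bool.not_false, if_true]
  split <;> rfl

-- the scan ↔ table equation, per known crisis type
theorem hA_key (ct : String)
    (hFlood : ct = "Flood" ∨ ct = "Landslide" ∨ ct = "Avalanche" ∨ ct = "Search & Rescue") :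
    ∀ s : String,
      (pvRecents.any (fun rec =>
        s == PySem.Str.lower rec.2 &&
        (PySem.Dict.getD pvTypeMapA ct [PySem.Str.lower ct]).any
          (fun m => PySem.Str.isIn (PySem.Str.lower m) (PySem.Str.lower rec.1))))
      = (PySem.Dict.getD pvCommonStates ct []).contains s := by
  intro s
  rcases hFlood with h | h | h | h <;> subst h <;>
    rw [any_eq_contains pvRecents
      (fun rec => (PySem.Dict.getD pvTypeMapA _ [PySem.Str.lower _]).any
          (fun m => PySem.Str.isIn (PySem.Str.lower m) (PySem.Str.lower rec.1))) s]
  · rw [show ((pvRecents.filter fun rec =>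
        (PySem.Dict.getD pvTypeMapA "Flood" [PySem.Str.lower "Flood"]).any
          (fun m => PySem.Str.isIn (PySem.Str.lower m) (PySem.Str.lower rec.1))).map
        (fun rec => PySem.Str.lower rec.2))
      = ["assam", "meghalaya", "mizoram", "himachal pradesh", "arunachal pradesh",
         "jammu & kashmir"] from by decide,
      show PySem.Dict.getD pvCommonStates "Flood" []
      = ["assam", "meghalaya", "mizoram", "himachal pradesh", "arunachal pradesh",
         "jammu & kashmir"] from by decide]
  · rw [show ((pvRecents.filter fun rec =>
        (PySem.Dict.getD pvTypeMapA "Landslide" [PySem.Str.lower "Landslide"]).any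
          (fun m => PySem.Str.isIn (PySem.Str.lower m) (PySem.Str.lower rec.1))).map
        (fun rec => PySem.Str.lower rec.2))
      = ["uttarakhand", "uttarakhand"] from by decide,
      show PySem.Dict.getD pvCommonStates "Landslide" [] = ["uttarakhand"] from by decide]
    simp
  · rw [show ((pvRecents.filter fun rec =>
        (PySem.Dict.getD pvTypeMapA "Avalanche" [PySem.Str.lower "Avalanche"]).any
          (fun m => PySem.Str.isIn (PySem.Str.lower m) (PySem.Str.lower rec.1))).map
        (fun rec => PySem.Str.lower rec.2))
      = ["uttarakhand"] from by decide,
      show PySem.Dict.getD pvCommonStates "Avalanche" [] = ["uttarakhand"] from by decide]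
  · rw [show ((pvRecents.filter fun rec =>
        (PySem.Dict.getD pvTypeMapA "Search & Rescue" [PySem.Str.lower "Search & Rescue"]).any
          (fun m => PySem.Str.isIn (PySem.Str.lower m) (PySem.Str.lower rec.1))).map
        (fun rec => PySem.Str.lower rec.2))
      = ["assam", "meghalaya", "mizoram", "uttarakhand", "himachal pradesh",
         "arunachal pradesh", "jammu & kashmir"] from by decide,
      show PySem.Dict.getD pvCommonStates "Search & Rescue" []
      = ["assam", "meghalaya", "mizoram", "uttarakhand", "himachal pradesh",
         "arunachal pradesh", "jammu & kashmir"] from by decide]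

-- ===== VERDICT (by name: the statement is the Claim_ definition above) =====
theorem dynamic_logic_warning_spec : Claim_equal_dynamic_logic_warning := by
  intro ct st _
  unfold Spec_dynamic_logic_warning
  by_cases h0 : PySem.Str.lower ct = "search & rescue"
  · simp only [dynamic_logic_warning, dynamic_logic_warning_alt, h0, BEq.rfl, if_true]
  · have hlow : (PySem.Str.lower ct == "search & rescue") = false := by simpa using h0
    by_cases h1 : ct = "Flood"
    · subst h1; exact key_case _ st hlow (hA_key _ (Or.inl rfl)) (by decide) (by decide)
    by_cases h2 : ct = "Landslide"
    · subst h2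
      exact key_case _ st hlow (hA_key _ (Or.inr (Or.inl rfl))) (by decide) (by decide)
    by_cases h3 : ct = "Avalanche"
    · subst h3
      exact key_case _ st hlow (hA_key _ (Or.inr (Or.inr (Or.inl rfl)))) (by decide) (by decide)
    by_cases h4 : ct = "Search & Rescue"
    · subst h4; exact absurd (by decide) h0
    · have hC : PySem.Dict.contains pvTypeMapA ct = false := by
        rw [PySem.Dict.contains_eq_decide_mem_keys,
          show pvTypeMapA.keys = ["Flood", "Landslide", "Avalanche", "Search & Rescue"]
            from by decide]
        simp [h1, h2, h3, h4]
      have hC' : PySem.Dict.contains pvTypeMapB ct = false := by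
        rw [PySem.Dict.contains_eq_decide_mem_keys,
          show pvTypeMapB.keys = ["Flood", "Landslide", "Avalanche", "Search & Rescue"]
            from by decide]
        simp [h1, h2, h3, h4]
      exact unknown_case ct st hlow hC hC'
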